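-- pv_equiv track=rewrite | github.com/benquick123/code-profiling | code/batch-2/vse-naloge-brez-testov/DN5-M-075.py | vse_osebe
-- ===== SOURCE A (Python) =====
-- def izloci_besedo(beseda):
--     a = ""
--     i = 0
--     for b in beseda:
--         if b.isalnum() == False:
--             i += 1
--         else:
--             a = beseda[i:]
--             break
--     i = 0
--     for b in a[::-1]:
--         if b.isalnum() == False:
--             i += 1
--         else:
--             if i == 0:
--                 break
--             else:
--                 a = a[:-i]
--                 break
--     return a
--
-- def se_zacne_z(tweet, c):
--     temp = []
--     result = []
--     t = tweet.split()
--     for word in t: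
--         if word.startswith(c):
--             temp.append(word)
--     for word in temp:
--         x = izloci_besedo(word)
--         result.append(x)
--     return result
--
-- def zberi_se_zacne_z(tweets, c):
--     temp = []
--     for tweet in tweets:
--         a = se_zacne_z(tweet, c)
--         for w in a:
--             if a != []:
--                 if w not in temp:
--                     temp.append(w)
--     temp = list(temp)
--     return temp
--
-- def vse_osebe(tweets):
--     a = zberi_se_zacne_z(tweets, "@")
--     for tweet in tweets:
--         temp = tweet.split()
--         temp_char = izloci_besedo(temp[0])
--         if temp_char not in a:
--             a.append(temp_char)
--     result = sorted(a)
--     return result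
-- ===== SOURCE B (Python) =====
-- # B: single pass over tweets accumulating one set (first word + @-mentions per tweet),
-- # replacing A's staged se_zacne_z/zberi_se_zacne_z two-phase pipeline; izloci_besedo kept.
-- def izloci_besedo(beseda):
--     a = ""
--     i = 0
--     for b in beseda:
--         if b.isalnum() == False:
--             i += 1
--         else:
--             a = beseda[i:]
--             break
--     i = 0
--     for b in a[::-1]:
--         if b.isalnum() == False:
--             i += 1
--         else:
--             if i == 0:
--                 break
--             else:
--                 a = a[:-i]
--                 break
--     return a
--
-- def vse_osebe(tweets):
--     osebe = set()
--     for tweet in tweets: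
--         words = tweet.split()
--         osebe.add(izloci_besedo(words[0]))
--         for word in words:
--             if word.startswith("@"):
--                 osebe.add(izloci_besedo(word))
--     return sorted(osebe)
-- ===== Notes on version B (the rewrite author's own statement) =====
-- stated objective: faster
-- what changed: A's staged pipeline (se_zacne_z per tweet, zberi_se_zacne_z deduplicating all @-mentions across tweets via list-membership scans, then a second whole pass over tweets for first words) is collapsed into one single pass per tweet that adds the first word and every @-mention into one hash set, then sorts it.
import Mathlib
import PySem

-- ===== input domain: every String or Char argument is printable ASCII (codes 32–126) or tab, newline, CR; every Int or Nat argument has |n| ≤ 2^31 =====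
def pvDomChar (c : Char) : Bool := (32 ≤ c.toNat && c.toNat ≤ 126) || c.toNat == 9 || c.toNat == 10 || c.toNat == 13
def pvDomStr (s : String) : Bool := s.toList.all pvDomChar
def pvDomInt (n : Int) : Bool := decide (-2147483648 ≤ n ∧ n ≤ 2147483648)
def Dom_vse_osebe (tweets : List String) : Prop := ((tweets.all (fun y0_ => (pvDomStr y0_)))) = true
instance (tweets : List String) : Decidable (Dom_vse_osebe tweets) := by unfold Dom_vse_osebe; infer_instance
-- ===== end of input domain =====

-- B fuses A's two-phase helper pipeline into one pass per tweet over one set; return value only,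
-- neither program mutates its argument.

-- ===== PORT A =====
-- first loop of izloci_besedo: count leading non-alnum chars into i, on the first alnum char set
-- a = beseda[i:] and break; if the loop exhausts, a keeps its initial value ""
def izloci_loop1 : List Char → Nat → List Char → List Char
  | [], _i, _orig => []
  | b :: bs, i, orig =>
    if PySem.Chars.isalnum b = false then izloci_loop1 bs (i + 1) orig
    else PySem.List.slice orig (some (i : Int)) none

-- second loop of izloci_besedo, over a[::-1] (ported as a.reverse, exact by slice?_none_none_neg_one):
-- count trailing non-alnum chars into i, on the first alnum char break (a = a[:-i] when i > 0)
def izloci_loop2 : List Char → Nat → List Char → List Char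
  | [], _i, a => a
  | b :: bs, i, a =>
    if PySem.Chars.isalnum b = false then izloci_loop2 bs (i + 1) a
    else if i = 0 then a else PySem.List.slice a none (some (-(i : Int)))

def izloci_besedo (beseda : String) : String :=
  let cs := beseda.toList
  let a := izloci_loop1 cs 0 cs
  String.ofList (izloci_loop2 a.reverse 0 a)

def se_zacne_z (tweet : String) (c : String) : List String :=
  let t := PySem.Str.split₀ tweet
  let temp := t.foldl (fun temp word => if PySem.Str.startswith word c then temp ++ [word] else temp) []
  temp.foldl (fun result word => result ++ [izloci_besedo word]) []

def zberi_se_zacne_z (tweets : List String) (c : String) : List String :=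
  tweets.foldl (fun temp tweet =>
    let a := se_zacne_z tweet c
    a.foldl (fun temp w =>
      if a ≠ [] then (if w ∈ temp then temp else temp ++ [w]) else temp) temp) []

def vse_osebe (tweets : List String) : List String :=
  let a := zberi_se_zacne_z tweets "@"
  let a := tweets.foldl (fun a tweet =>
    let temp := PySem.Str.split₀ tweet
    -- temp[0]: total form pyGetD; Pre_vse_osebe guarantees temp ≠ [] (Python raises IndexError otherwise)
    let temp_char := izloci_besedo (PySem.List.pyGetD temp 0 "")
    if temp_char ∈ a then a else a ++ [temp_char]) a
  PySem.List.sorted a (fun x => x) false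

-- ===== PORT B =====
def vse_osebe_alt (tweets : List String) : List String :=
  let osebe : PySem.Set String := tweets.foldl (fun osebe tweet =>
    let words := PySem.Str.split₀ tweet
    -- words[0]: total form pyGetD; Pre_vse_osebe guarantees words ≠ [] (Python raises IndexError otherwise)
    let osebe := PySem.Set.add osebe (izloci_besedo (PySem.List.pyGetD words 0 ""))
    words.foldl (fun osebe word =>
      if PySem.Str.startswith word "@" then PySem.Set.add osebe (izloci_besedo word) else osebe) osebe)
    PySem.Set.empty
  PySem.List.sorted osebe (fun x => x) false

-- ===== PRECONDITION & SPEC =====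
-- Pre_ excludes exactly the inputs where some tweet splits into no words at all
-- (empty or whitespace-only tweet): there A (and B) raise IndexError on the first word.
def Pre_vse_osebe (tweets : List String) : Prop :=
  ∀ tweet ∈ tweets, PySem.Str.split₀ tweet ≠ []
instance (tweets : List String) : Decidable (Pre_vse_osebe tweets) := by
  unfold Pre_vse_osebe; infer_instance

def pvWitness_vse_osebe : List String := ["@ana hello @Bob!", "zdravo @ana svet"]

def Spec_vse_osebe (tweets : List String) (out : List String) : Prop := out = vse_osebe_alt tweets
instance (tweets : List String) (out : List String) : Decidable (Spec_vse_osebe tweets out) := by unfold Spec_vse_osebe; infer_instance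

-- ===== CLAIM (what is proved, stated in full; the proofs are below) =====
def Claim_equal_vse_osebe : Prop := ∀ (tweets : List String), Dom_vse_osebe tweets → Pre_vse_osebe tweets → Spec_vse_osebe tweets (vse_osebe tweets)

-- ===== LEMMAS AND PROOFS =====

-- the words contributed by one tweet: izloci_besedo of every word starting with "@"
def pvMentions (tweet : String) : List String :=
  ((PySem.Str.split₀ tweet).filter (fun w => PySem.Str.startswith w "@")).map izloci_besedo

-- izloci_besedo of the first word of a tweet (total form; Pre_ keeps split₀ nonempty)
def pvFirst (tweet : String) : String :=
  izloci_besedo (PySem.List.pyGetD (PySem.Str.split₀ tweet) 0 "")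

theorem pv_gadd_eq_add (temp : List String) (w : String) :
    (if w ∈ temp then temp else temp ++ [w]) = PySem.Set.add temp w := by
  by_cases h : w ∈ temp <;> simp [PySem.Set.add, PySem.Set.contains, h]

theorem pv_se_zacne_z_eq (tweet : String) :
    se_zacne_z tweet "@" = pvMentions tweet := by
  unfold se_zacne_z pvMentions
  simp only [PySem.List.foldl_append_if, PySem.List.foldl_append_singleton_eq_map,
    List.nil_append]
  simp

theorem pv_mem_foldl_add (l s : List String) (x : String) :
    x ∈ l.foldl PySem.Set.add s ↔ x ∈ s ∨ x ∈ l := by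
  induction l generalizing s with
  | nil => simp
  | cons h t ih => simp [ih, PySem.Set.mem_add, or_assoc]

theorem pv_nodup_foldl_add (l s : List String) (hs : s.Nodup) :
    (l.foldl PySem.Set.add s).Nodup := by
  induction l generalizing s with
  | nil => exact hs
  | cons h t ih => exact ih _ (PySem.Set.nodup_add s h hs)

-- A's inner zberi loop (with its vacuous `a != []` guard over the list a itself) is a Set.add fold
theorem pv_zberi_inner (a temp : List String) :
    a.foldl (fun temp w => if a ≠ [] then (if w ∈ temp then temp else temp ++ [w]) else temp) temp
      = a.foldl PySem.Set.add temp := by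
  by_cases h : a = []
  · subst h; rfl
  · simp only [if_pos h, pv_gadd_eq_add]

-- A's zberi step function, with its let and guard removed
theorem pv_step_eq :
    (fun (temp : List String) (tweet : String) =>
      let a := se_zacne_z tweet "@"
      a.foldl (fun temp w => if a ≠ [] then (if w ∈ temp then temp else temp ++ [w]) else temp) temp)
      = fun temp tweet => (pvMentions tweet).foldl PySem.Set.add temp := by
  funext temp tweet
  show (se_zacne_z tweet "@").foldl _ temp = _
  rw [pv_zberi_inner, pv_se_zacne_z_eq]

-- membership / nodup of a fold that set-adds g t for every t
theorem pv_update_mem (g : String → List String) (ts acc : List String) (x : String) :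
    x ∈ ts.foldl (fun s t => (g t).foldl PySem.Set.add s) acc ↔ x ∈ acc ∨ ∃ t ∈ ts, x ∈ g t := by
  induction ts generalizing acc with
  | nil => simp
  | cons h t ih =>
    simp only [List.foldl_cons, ih, pv_mem_foldl_add, List.mem_cons]
    constructor
    · rintro ((h1 | h2) | ⟨u, hu, h3⟩)
      · exact Or.inl h1
      · exact Or.inr ⟨h, Or.inl rfl, h2⟩
      · exact Or.inr ⟨u, Or.inr hu, h3⟩
    · rintro (h1 | ⟨u, (rfl | hu), h3⟩)
      · exact Or.inl (Or.inl h1)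
      · exact Or.inl (Or.inr h3)
      · exact Or.inr ⟨u, hu, h3⟩

theorem pv_update_nodup (g : String → List String) (ts acc : List String) (hs : acc.Nodup) :
    (ts.foldl (fun s t => (g t).foldl PySem.Set.add s) acc).Nodup := by
  induction ts generalizing acc with
  | nil => exact hs
  | cons h t ih => exact ih _ (pv_nodup_foldl_add _ _ hs)

-- A's second phase: membership and nodup
theorem pv_phase2_aux (ts acc : List String) (x : String) :
    (x ∈ ts.foldl (fun a tweet =>
        let temp := PySem.Str.split₀ tweet
        let temp_char := izloci_besedo (PySem.List.pyGetD temp 0 "")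
        if temp_char ∈ a then a else a ++ [temp_char]) acc
      ↔ x ∈ acc ∨ ∃ t ∈ ts, x = pvFirst t) := by
  induction ts generalizing acc with
  | nil => simp
  | cons h t ih =>
    simp only [List.foldl_cons]
    rw [ih]
    simp only [pv_gadd_eq_add, PySem.Set.mem_add, List.mem_cons]
    unfold pvFirst
    constructor
    · rintro ((h1 | h2) | ⟨u, hu, h3⟩)
      · exact Or.inl h1
      · exact Or.inr ⟨h, Or.inl rfl, h2⟩
      · exact Or.inr ⟨u, Or.inr hu, h3⟩
    · rintro (h1 | ⟨u, (rfl | hu), h3⟩)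
      · exact Or.inl (Or.inl h1)
      · exact Or.inl (Or.inr h3)
      · exact Or.inr ⟨u, hu, h3⟩

theorem pv_phase2_nodup (ts acc : List String) (hs : acc.Nodup) :
    (ts.foldl (fun a tweet =>
        let temp := PySem.Str.split₀ tweet
        let temp_char := izloci_besedo (PySem.List.pyGetD temp 0 "")
        if temp_char ∈ a then a else a ++ [temp_char]) acc).Nodup := by
  induction ts generalizing acc with
  | nil => exact hs
  | cons h t ih =>
    simp only [List.foldl_cons]
    refine ih _ ?_
    rw [pv_gadd_eq_add]
    exact PySem.Set.nodup_add _ _ hs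

-- B's inner word loop: membership and nodup
theorem pv_b_inner_mem (l : List String) (s : PySem.Set String) (x : String) :
    (x ∈ l.foldl (fun s w => if PySem.Str.startswith w "@" then PySem.Set.add s (izloci_besedo w) else s) s
      ↔ x ∈ s ∨ x ∈ (l.filter (fun w => PySem.Str.startswith w "@")).map izloci_besedo) := by
  induction l generalizing s with
  | nil => simp
  | cons h t ih =>
    by_cases hp : PySem.Str.startswith h "@" = true
    · simp only [List.foldl_cons, hp, ih, PySem.Set.mem_add, List.filter_cons, List.map_cons,
        List.mem_cons, if_true]
      tauto
    · have hp' : PySem.Str.startswith h "@" = false := by rwa [Bool.not_eq_true] at hp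
      simp only [List.foldl_cons, hp', ih, List.filter_cons, Bool.false_eq_true, if_false]

theorem pv_b_inner_nodup (l : List String) (s : PySem.Set String) (hs : s.Nodup) :
    (l.foldl (fun s w => if PySem.Str.startswith w "@" then PySem.Set.add s (izloci_besedo w) else s) s).Nodup := by
  induction l generalizing s with
  | nil => exact hs
  | cons h t ih =>
    by_cases hp : PySem.Str.startswith h "@" = true
    · simp only [List.foldl_cons, hp, if_true]; exact ih _ (PySem.Set.nodup_add _ _ hs)
    · have hp' : PySem.Str.startswith h "@" = false := by rwa [Bool.not_eq_true] at hp
      simp only [List.foldl_cons, hp', Bool.false_eq_true, if_false]; exact ih _ hs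

-- B's outer fold: membership and nodup
theorem pv_b_aux (ts : List String) (acc : PySem.Set String) (x : String) :
    (x ∈ ts.foldl (fun osebe tweet =>
        let words := PySem.Str.split₀ tweet
        let osebe := PySem.Set.add osebe (izloci_besedo (PySem.List.pyGetD words 0 ""))
        words.foldl (fun osebe word =>
          if PySem.Str.startswith word "@" then PySem.Set.add osebe (izloci_besedo word) else osebe) osebe) acc
      ↔ x ∈ acc ∨ ∃ t ∈ ts, (x = pvFirst t ∨ x ∈ pvMentions t)) := by
  induction ts generalizing acc with
  | nil => simp
  | cons h t ih =>
    simp only [List.foldl_cons]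
    rw [ih]
    simp only [pv_b_inner_mem, PySem.Set.mem_add, List.mem_cons]
    unfold pvFirst pvMentions
    constructor
    · rintro (((h1 | h2) | h3) | ⟨u, hu, h4⟩)
      · exact Or.inl h1
      · exact Or.inr ⟨h, Or.inl rfl, Or.inl h2⟩
      · exact Or.inr ⟨h, Or.inl rfl, Or.inr h3⟩
      · exact Or.inr ⟨u, Or.inr hu, h4⟩
    · rintro (h1 | ⟨u, rfl | hu, h4 | h5⟩)
      · exact Or.inl (Or.inl (Or.inl h1))
      · exact Or.inl (Or.inl (Or.inr h4))
      · exact Or.inl (Or.inr h5)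
      · exact Or.inr ⟨u, hu, Or.inl h4⟩
      · exact Or.inr ⟨u, hu, Or.inr h5⟩

theorem pv_b_nodup (ts : List String) (acc : PySem.Set String) (hs : acc.Nodup) :
    (ts.foldl (fun osebe tweet =>
        let words := PySem.Str.split₀ tweet
        let osebe := PySem.Set.add osebe (izloci_besedo (PySem.List.pyGetD words 0 ""))
        words.foldl (fun osebe word =>
          if PySem.Str.startswith word "@" then PySem.Set.add osebe (izloci_besedo word) else osebe) osebe) acc).Nodup := by
  induction ts generalizing acc with
  | nil => exact hs
  | cons h t ih =>
    exact ih _ (pv_b_inner_nodup _ _ (PySem.Set.nodup_add _ _ hs))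

-- ===== VERDICT (by name: the statement is the Claim_ definition above) =====
theorem vse_osebe_spec : Claim_equal_vse_osebe := by
  intro tweets _hdom _hpre
  unfold Spec_vse_osebe vse_osebe vse_osebe_alt zberi_se_zacne_z
  rw [pv_step_eq]
  apply PySem.List.sorted_eq_sorted_of_perm _ _ _ (fun _ _ h => h)
  rw [List.perm_ext_iff_of_nodup]
  · intro x
    rw [pv_phase2_aux, pv_update_mem, pv_b_aux]
    simp only [List.not_mem_nil, false_or, PySem.Set.empty]
    constructor
    · rintro (⟨t, ht, hm⟩ | ⟨t, ht, hf⟩)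
      · exact ⟨t, ht, Or.inr hm⟩
      · exact ⟨t, ht, Or.inl hf⟩
    · rintro ⟨t, ht, hf | hm⟩
      · exact Or.inr ⟨t, ht, hf⟩
      · exact Or.inl ⟨t, ht, hm⟩
  · exact pv_phase2_nodup _ _ (pv_update_nodup _ _ _ List.nodup_nil)
  · exact pv_b_nodup _ _ List.nodup_nil
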